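-- pv_equiv track=rewrite | github.com/priii-25/SideKick-EduTech | chatbot.py | decompose_query
-- ===== SOURCE A (Python) =====
-- def decompose_query(query: str):
--     steps = []
--     tokens = query.lower().replace(',', ' ').split()
--     current_segment = []
--     for token in tokens:
--         if token in ["and", "then", "also"]:
--             if current_segment:
--                 steps.append(" ".join(current_segment))
--                 current_segment = []
--         else:
--             current_segment.append(token)
--     if current_segment:
--         steps.append(" ".join(current_segment))
--
--     return steps
-- ===== SOURCE B (Python) =====
-- def decompose_query(query: str):
--     tokens = query.lower().replace(',', ' ').split()
--     conn = {"and", "then", "also"}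
--     steps = []
--     i, n = 0, len(tokens)
--     while i < n:
--         if tokens[i] in conn:
--             i += 1
--             continue
--         j = i
--         while j < n and tokens[j] not in conn:
--             j += 1
--         steps.append(" ".join(tokens[i:j]))
--         i = j
--     return steps
-- ===== Notes on version B (the rewrite author's own statement) =====
-- stated objective: alternative
-- what changed: Replaces A's accumulate-and-flush loop (steps + current_segment state, with a trailing flush after the loop) by a stateless two-pointer scan that slices out each maximal run of non-connector tokens and joins it directly.
import Mathlib
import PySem

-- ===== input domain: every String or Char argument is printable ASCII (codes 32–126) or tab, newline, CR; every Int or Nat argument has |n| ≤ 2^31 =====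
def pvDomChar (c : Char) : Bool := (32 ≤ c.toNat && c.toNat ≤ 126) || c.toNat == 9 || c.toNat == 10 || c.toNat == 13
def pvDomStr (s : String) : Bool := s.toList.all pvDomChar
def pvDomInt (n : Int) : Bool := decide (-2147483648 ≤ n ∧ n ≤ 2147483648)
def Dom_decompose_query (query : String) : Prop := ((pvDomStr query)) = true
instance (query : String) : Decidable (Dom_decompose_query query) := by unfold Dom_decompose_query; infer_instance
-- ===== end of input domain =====

-- B replaces A's accumulate-and-flush loop by a stateless scan over maximal runs of
-- non-connector tokens (alternative decomposition, same cost).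

-- ===== PORT A =====
-- one loop step of A: (steps, current_segment) updated by one token
def pvStepA (st : List String × List String) (token : String) : List String × List String :=
  if ["and", "then", "also"].contains token then
    if st.2 = [] then st else (st.1 ++ [PySem.Str.join " " st.2], [])
  else (st.1, st.2 ++ [token])

def decompose_query (query : String) : List String :=
  let tokens := PySem.Str.split₀ (PySem.Str.replace (PySem.Str.lower query) "," " ")
  let st := tokens.foldl pvStepA ([], [])
  if st.2 = [] then st.1 else st.1 ++ [PySem.Str.join " " st.2]

-- ===== PORT B =====
def pvConn : PySem.Set String := PySem.Set.ofList ["and", "then", "also"]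

-- the two-pointer scan of Source B: skip a connector, or slice out the maximal
-- non-connector run starting here and join it
def pvRuns (ts : List String) : List String :=
  match ts with
  | [] => []
  | t :: rest =>
    if PySem.Set.contains pvConn t then pvRuns rest
    else
      PySem.Str.join " " (t :: rest.takeWhile (fun x => !PySem.Set.contains pvConn x)) ::
        pvRuns (rest.dropWhile (fun x => !PySem.Set.contains pvConn x))
termination_by ts.length
decreasing_by
  · simp
  · simpa using Nat.lt_succ_of_le (List.length_dropWhile_le _ _)

def decompose_query_alt (query : String) : List String :=
  let tokens := PySem.Str.split₀ (PySem.Str.replace (PySem.Str.lower query) "," " ")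
  pvRuns tokens

-- ===== PRECONDITION & SPEC =====
def Spec_decompose_query (query : String) (out : List String) : Prop := out = decompose_query_alt query
instance (query : String) (out : List String) : Decidable (Spec_decompose_query query out) := by unfold Spec_decompose_query; infer_instance

-- ===== CLAIM (what is proved, stated in full; the proofs are below) =====
def Claim_equal_decompose_query : Prop := ∀ (query : String), Dom_decompose_query query → Spec_decompose_query query (decompose_query query)

-- ===== LEMMAS AND PROOFS =====

-- the set literal of Source B is the distinct list of its elements
lemma pvConn_eq : pvConn = ["and", "then", "also"] := by decide

-- A's fold only appends to the steps component
lemma pvFoldA_prefix (ts : List String) (steps cur : List String) :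
    ts.foldl pvStepA (steps, cur)
      = (steps ++ (ts.foldl pvStepA ([], cur)).1, (ts.foldl pvStepA ([], cur)).2) := by
  induction ts generalizing steps cur with
  | nil => simp
  | cons t rest ih =>
    simp only [List.foldl_cons]
    by_cases hc : t ∈ (["and", "then", "also"] : List String)
    · by_cases h0 : cur = []
      · simpa [pvStepA, hc, h0] using ih steps []
      · simp only [pvStepA, hc, h0, List.contains_iff_mem, decide_true, if_true, if_false,
          List.nil_append]
        rw [ih (steps ++ [PySem.Str.join " " cur]), ih [PySem.Str.join " " cur]]
        simp
    · simp only [pvStepA, List.contains_iff_mem, hc, decide_false, Bool.false_eq_true, if_false]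
      exact ih steps (cur ++ [t])

-- the "finish" of A's state
def pvFinish (st : List String × List String) : List String :=
  if st.2 = [] then st.1 else st.1 ++ [PySem.Str.join " " st.2]

lemma pvRuns_cons_conn (t : String) (rest : List String) (h : t ∈ pvConn) :
    pvRuns (t :: rest) = pvRuns rest := by
  rw [pvRuns.eq_def]; simp [h]

lemma pvRuns_cons_nonconn (t : String) (rest : List String) (h : t ∉ pvConn) :
    pvRuns (t :: rest)
      = PySem.Str.join " " (t :: rest.takeWhile (fun x => !PySem.Set.contains pvConn x)) ::
          pvRuns (rest.dropWhile (fun x => !PySem.Set.contains pvConn x)) := by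
  rw [pvRuns.eq_def]; simp [h]

-- key invariant: A's fold from (steps=[], cur) equals B's run scan, with a pending
-- nonempty cur merged into the first run
lemma pvFold_eq_runs (ts : List String) : ∀ cur : List String,
    pvFinish (ts.foldl pvStepA ([], cur))
      = if cur = [] then pvRuns ts
        else PySem.Str.join " " (cur ++ ts.takeWhile (fun x => !PySem.Set.contains pvConn x)) ::
             pvRuns (ts.dropWhile (fun x => !PySem.Set.contains pvConn x)) := by
  induction ts with
  | nil =>
    intro cur
    by_cases h0 : cur = [] <;> simp [pvFinish, pvRuns, h0]
  | cons t rest ih =>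
    intro cur
    by_cases hc : t ∈ (["and", "then", "also"] : List String)
    · have hc2 : t ∈ pvConn := by rw [pvConn_eq]; exact hc
      by_cases h0 : cur = []
      · subst h0
        simp only [List.foldl_cons, pvStepA, List.contains_iff_mem, hc, decide_true, if_true,
          ite_self, ite_true, if_pos rfl]
        rw [ih [], if_pos rfl, pvRuns_cons_conn t rest hc2]
      · simp only [List.foldl_cons, pvStepA, List.contains_iff_mem, hc, decide_true, if_true,
          h0, if_false, List.nil_append]
        rw [pvFoldA_prefix rest [PySem.Str.join " " cur] []]
        have hfin : pvFinish (([PySem.Str.join " " cur] ++ (rest.foldl pvStepA ([], [])).1,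
                 (rest.foldl pvStepA ([], [])).2))
             = [PySem.Str.join " " cur] ++ pvFinish (rest.foldl pvStepA ([], [])) := by
          unfold pvFinish
          by_cases he : (rest.foldl pvStepA ([], [])).2 = [] <;> simp [he]
        rw [hfin, ih [], if_pos rfl, List.takeWhile_cons, List.dropWhile_cons]
        simp [hc2, pvRuns_cons_conn t rest hc2]
    · have hc2 : t ∉ pvConn := by rw [pvConn_eq]; exact hc
      simp only [List.foldl_cons, pvStepA, List.contains_iff_mem, hc, decide_false,
        Bool.false_eq_true, if_false, List.nil_append]
      by_cases h0 : cur = []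
      · subst h0
        simp only [List.nil_append]
        rw [ih [t], if_neg (by simp)]
        simp [pvRuns_cons_nonconn t rest hc2]
      · rw [ih (cur ++ [t]), if_neg (by simp [h0]), if_neg h0, List.takeWhile_cons,
          List.dropWhile_cons]
        simp [hc2]

-- ===== VERDICT (by name: the statement is the Claim_ definition above) =====
theorem decompose_query_spec : Claim_equal_decompose_query := by
  intro query _
  unfold Spec_decompose_query decompose_query decompose_query_alt
  have := pvFold_eq_runs (PySem.Str.split₀ (PySem.Str.replace (PySem.Str.lower query) "," " ")) []
  simpa [pvFinish] using this
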